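-- pv_equiv track=rewrite | github.com/BroCoder007/Loopy_SimonTatham_Games | logic/solvers/dynamic_programming_solver.py | _is_valid_final_solution
-- ===== SOURCE A (Python) =====
-- from typing import Any, Dict, List, Optional, Set, Tuple
--
-- Vertex = Tuple[int, int]
--
-- Edge = Tuple[Vertex, Vertex]
--
-- def _is_valid_final_solution(edges: Set[Edge], clues: Dict[Tuple[int, int], int]) -> bool:
--     """
--     Final acceptance validation on reconstructed edge set:
--     - all clues satisfied
--     - no degree-1 vertices
--     - exactly one connected component among active vertices only (degree > 0)
--     """
--     if not edges:
--         return False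
--
--     for (r, c), clue in sorted(clues.items()):
--         count = 0
--         if tuple(sorted(((r, c), (r, c + 1)))) in edges:
--             count += 1
--         if tuple(sorted(((r + 1, c), (r + 1, c + 1)))) in edges:
--             count += 1
--         if tuple(sorted(((r, c), (r + 1, c)))) in edges:
--             count += 1
--         if tuple(sorted(((r, c + 1), (r + 1, c + 1)))) in edges:
--             count += 1
--         if count != clue:
--             return False
--
--     adjacency: Dict[Vertex, Set[Vertex]] = {}
--     for u, v in edges:
--         if u not in adjacency:
--             adjacency[u] = set()
--         if v not in adjacency:
--             adjacency[v] = set()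
--         adjacency[u].add(v)
--         adjacency[v].add(u)
--
--     active_vertices = sorted(adjacency.keys())
--     if not active_vertices:
--         return False
--
--     for vertex in active_vertices:
--         degree = len(adjacency[vertex])
--         if degree == 1:
--             return False
--
--     components = 0
--     visited: Set[Vertex] = set()
--     for start in active_vertices:
--         if start in visited:
--             continue
--         components += 1
--         stack = [start]
--         visited.add(start)
--         while stack:
--             node = stack.pop()
--             for neighbor in adjacency[node]:
--                 if neighbor in visited:
--                     continue
--                 visited.add(neighbor)
--                 stack.append(neighbor)
--
--     return components == 1
-- ===== SOURCE B (Python) =====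
-- def _is_valid_final_solution(edges, clues):
--     if not edges:
--         return False
--
--     for (r, c), clue in clues.items():
--         cells = (((r, c), (r, c + 1)),
--                  ((r + 1, c), (r + 1, c + 1)),
--                  ((r, c), (r + 1, c)),
--                  ((r, c + 1), (r + 1, c + 1)))
--         if sum(e in edges for e in cells) != clue:
--             return False
--
--     def nbrs(vs):
--         out = set()
--         for a, b in edges:
--             if a in vs:
--                 out.add(b)
--             if b in vs:
--                 out.add(a)
--         return out
--
--     verts = set()
--     for a, b in edges:
--         verts.add(a)
--         verts.add(b)
--
--     if any(len(nbrs({v})) == 1 for v in verts):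
--         return False
--
--     reach = {next(iter(edges))[0]}
--     for _ in range(len(verts)):
--         reach |= nbrs(reach)
--     return len(reach) == len(verts)
-- ===== Notes on version B (the rewrite author's own statement) =====
-- stated objective: alternative
-- what changed: B checks clues directly (dropping the redundant 2-element sorts), reads neighbour sets and degrees straight off the edge list instead of building an adjacency dict, and decides single-connectedness by an iterated neighbourhood-closure fixpoint (reach |= nbrs(reach), |V| times, from one endpoint) instead of A's explicit-stack DFS with component counting.
import Mathlib
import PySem

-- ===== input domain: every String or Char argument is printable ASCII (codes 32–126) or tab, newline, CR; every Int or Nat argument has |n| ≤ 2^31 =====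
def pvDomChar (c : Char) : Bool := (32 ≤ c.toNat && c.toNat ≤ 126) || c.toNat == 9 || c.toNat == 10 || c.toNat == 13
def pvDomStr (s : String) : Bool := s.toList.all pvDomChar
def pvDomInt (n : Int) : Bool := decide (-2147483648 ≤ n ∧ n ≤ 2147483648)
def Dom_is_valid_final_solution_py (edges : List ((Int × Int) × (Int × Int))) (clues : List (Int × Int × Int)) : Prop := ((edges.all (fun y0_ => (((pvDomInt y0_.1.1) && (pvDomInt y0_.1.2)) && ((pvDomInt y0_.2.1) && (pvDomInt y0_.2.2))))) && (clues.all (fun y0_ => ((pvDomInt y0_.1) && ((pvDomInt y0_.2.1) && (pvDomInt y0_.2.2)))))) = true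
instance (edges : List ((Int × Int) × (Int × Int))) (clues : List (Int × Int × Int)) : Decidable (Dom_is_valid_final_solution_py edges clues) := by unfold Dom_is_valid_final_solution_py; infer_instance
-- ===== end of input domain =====

-- B replaces A's DFS-with-stack component count by an iterated neighbourhood-closure fixpoint and drops the
-- adjacency dict (neighbour sets are read off the edge list) and the redundant 2-element sorts: an alternative
-- (not faster) formulation; return value only — neither version mutates its arguments.

-- ===== PORT A =====
abbrev PVtx := Int × Int

-- Python's 2-tuple '<' (lexicographic), used by tuple(sorted((p, q)))
def pvPairLe (p q : PVtx) : Bool := decide (p.1 < q.1) || (p.1 == q.1 && decide (p.2 ≤ q.2))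

-- tuple(sorted((p, q))): CPython's sort on a 2-element list keeps the order iff p <= q (stable)
def pvSort2 (p q : PVtx) : PVtx × PVtx := if pvPairLe p q then (p, q) else (q, p)

-- Python's '<' on ((r, c), clue) items (lexicographic on the nested 3 ints)
def pvTripLt (a b : Int × Int × Int) : Bool :=
  decide (a.1 < b.1) || (a.1 == b.1 && (decide (a.2.1 < b.2.1) || (a.2.1 == b.2.1 && decide (a.2.2 < b.2.2))))

-- sorted(clues.items()): PySem's insertion sort (PySem.List.sorted_eq_foldl_insertBy) with the tuple comparator
-- written out (PySem.List.sorted2 covers only 2-component keys; items here are 3-component)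
def pvSortedClues (clues : List (Int × Int × Int)) : List (Int × Int × Int) :=
  clues.foldl (fun acc x => PySem.List.insertBy pvTripLt x acc) []

def pvClueCountA (edges : List (PVtx × PVtx)) (r c : Int) : Int :=
  let count : Int := 0
  let count := if edges.contains (pvSort2 (r, c) (r, c + 1)) then count + 1 else count
  let count := if edges.contains (pvSort2 (r + 1, c) (r + 1, c + 1)) then count + 1 else count
  let count := if edges.contains (pvSort2 (r, c) (r + 1, c)) then count + 1 else count
  let count := if edges.contains (pvSort2 (r, c + 1) (r + 1, c + 1)) then count + 1 else count
  count

def pvClueLoopA (edges : List (PVtx × PVtx)) : List (Int × Int × Int) → Bool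
  | [] => true
  | (r, c, clue) :: rest =>
      if pvClueCountA edges r c ≠ clue then false else pvClueLoopA edges rest

def pvAdjStep (d : PySem.Dict PVtx (PySem.Set PVtx)) (uv : PVtx × PVtx) : PySem.Dict PVtx (PySem.Set PVtx) :=
  let d := if d.contains uv.1 then d else d.insert uv.1 PySem.Set.empty
  let d := if d.contains uv.2 then d else d.insert uv.2 PySem.Set.empty
  let d := d.modify uv.1 PySem.Set.empty (fun s => PySem.Set.add s uv.2)
  d.modify uv.2 PySem.Set.empty (fun s => PySem.Set.add s uv.1)

def pvAdjA (edges : List (PVtx × PVtx)) : PySem.Dict PVtx (PySem.Set PVtx) :=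
  edges.foldl pvAdjStep PySem.Dict.empty

def pvDegLoopA (adj : PySem.Dict PVtx (PySem.Set PVtx)) : List PVtx → Bool
  | [] => true
  | v :: rest =>
      if PySem.Set.len (adj.getD v PySem.Set.empty) = 1 then false else pvDegLoopA adj rest

-- termination aids for the DFS while-loop (ghost data: a universe containing every vertex the loop can touch)
def pvUniv (adj : PySem.Dict PVtx (PySem.Set PVtx)) : List PVtx := adj.keys ++ adj.values.flatten

def pvUnvis (adj : PySem.Dict PVtx (PySem.Set PVtx)) (vis : PySem.Set PVtx) : Nat :=
  ((pvUniv adj).toFinset \ vis.toFinset).card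

-- the inner 'for neighbor in adjacency[node]' loop (stack kept reversed: Python pushes/pops at the list end)
def pvPush (ws stack : List PVtx) (vis : PySem.Set PVtx) : List PVtx × PySem.Set PVtx :=
  match ws with
  | [] => (stack, vis)
  | w :: ws' =>
      if PySem.Set.contains vis w then pvPush ws' stack vis
      else pvPush ws' (w :: stack) (PySem.Set.add vis w)

lemma pvPush_cons_of_mem {w : PVtx} {vis : PySem.Set PVtx} (ws' stack : List PVtx)
    (h : w ∈ vis) : pvPush (w :: ws') stack vis = pvPush ws' stack vis := by
  have hc : PySem.Set.contains vis w = true := (PySem.Set.contains_iff _ _).2 h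
  simp only [pvPush, hc, if_true]

lemma pvPush_cons_of_not_mem {w : PVtx} {vis : PySem.Set PVtx} (ws' stack : List PVtx)
    (h : w ∉ vis) : pvPush (w :: ws') stack vis = pvPush ws' (w :: stack) (PySem.Set.add vis w) := by
  have hc : PySem.Set.contains vis w = false :=
    Bool.eq_false_iff.2 (fun hc => h ((PySem.Set.contains_iff _ _).1 hc))
  simp only [pvPush, hc, Bool.false_eq_true, if_false]

lemma pvPush_measure (adj : PySem.Dict PVtx (PySem.Set PVtx)) (ws stack : List PVtx)
    (vis : PySem.Set PVtx) (hws : ∀ w ∈ ws, w ∈ pvUniv adj) :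
    2 * pvUnvis adj (pvPush ws stack vis).2 + (pvPush ws stack vis).1.length ≤
      2 * pvUnvis adj vis + stack.length := by
  induction ws generalizing stack vis with
  | nil => simp [pvPush]
  | cons w ws' ih =>
    by_cases h : w ∈ vis
    · rw [pvPush_cons_of_mem ws' stack h]
      exact ih stack vis (fun x hx => hws x (by simp [hx]))
    · rw [pvPush_cons_of_not_mem ws' stack h]
      have hwU : w ∈ pvUniv adj := hws w (by simp)
      have hmemdiff : w ∈ (pvUniv adj).toFinset \ vis.toFinset := by
        simp [List.mem_toFinset, hwU, h]
      have hfin : (PySem.Set.add vis w).toFinset = insert w vis.toFinset := by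
        simp [PySem.Set.add_of_not_mem h]
      have hcard : pvUnvis adj (PySem.Set.add vis w) = pvUnvis adj vis - 1 := by
        unfold pvUnvis
        rw [hfin, Finset.sdiff_insert, Finset.card_erase_of_mem hmemdiff]
      have hpos : 1 ≤ pvUnvis adj vis := by
        have := Finset.card_pos.2 ⟨w, hmemdiff⟩
        unfold pvUnvis; omega
      have hih := ih (w :: stack) (PySem.Set.add vis w) (fun x hx => hws x (by simp [hx]))
      simp only [List.length_cons] at hih ⊢
      omega

-- neighbours looked up in any dict lie in its pvUniv (values are flattened into it)
lemma pv_getD_mem_univ (adj : PySem.Dict PVtx (PySem.Set PVtx)) (node w : PVtx)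
    (hw : w ∈ adj.getD node PySem.Set.empty) : w ∈ pvUniv adj := by
  unfold PySem.Dict.getD at hw
  cases hg : adj.get? node with
  | none => rw [hg] at hw; simp [PySem.Set.empty] at hw
  | some s =>
    rw [hg] at hw
    simp only [Option.getD_some] at hw
    have : (node, s) ∈ adj.items := PySem.Dict.mem_items_of_get?_eq_some _ hg
    have hs : s ∈ adj.values := by
      simp only [PySem.Dict.values]
      exact List.mem_map.2 ⟨(node, s), this, rfl⟩
    unfold pvUniv
    exact List.mem_append.2 (Or.inr (List.mem_flatten.2 ⟨s, hs, hw⟩))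

-- the DFS while-loop: pop a node, push its unvisited neighbours
def pvDfs (adj : PySem.Dict PVtx (PySem.Set PVtx)) : List PVtx → PySem.Set PVtx → PySem.Set PVtx
  | [], vis => vis
  | node :: rest, vis =>
      let p := pvPush (adj.getD node PySem.Set.empty) rest vis
      pvDfs adj p.1 p.2
termination_by stack vis => 2 * pvUnvis adj vis + stack.length
decreasing_by
  have h := pvPush_measure adj (adj.getD node PySem.Set.empty) rest vis
    (fun w hw => pv_getD_mem_univ adj node w hw)
  simp only [List.length_cons]
  omega

def pvCompLoop (adj : PySem.Dict PVtx (PySem.Set PVtx)) :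
    List PVtx → PySem.Set PVtx → Int → Int
  | [], _, c => c
  | s :: rest, vis, c =>
      if PySem.Set.contains vis s then pvCompLoop adj rest vis c
      else pvCompLoop adj rest (pvDfs adj [s] (PySem.Set.add vis s)) (c + 1)

def is_valid_final_solution_py (edges : List ((Int × Int) × (Int × Int))) (clues : List (Int × Int × Int)) : Bool :=
  if edges.isEmpty then false
  else if pvClueLoopA edges (pvSortedClues clues) = false then false
  else
    let adj := pvAdjA edges
    let active := PySem.List.sorted2 adj.keys (fun v => v.1) (fun v => v.2)
    if active.isEmpty then false
    else if pvDegLoopA adj active = false then false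
    else decide (pvCompLoop adj active PySem.Set.empty 0 = 1)

-- ===== PORT B =====
def pvCells (r c : Int) : List (PVtx × PVtx) :=
  [((r, c), (r, c + 1)), ((r + 1, c), (r + 1, c + 1)), ((r, c), (r + 1, c)), ((r, c + 1), (r + 1, c + 1))]

def pvClueLoopB (edges : List (PVtx × PVtx)) : List (Int × Int × Int) → Bool
  | [] => true
  | (r, c, clue) :: rest =>
      if ((pvCells r c).map (fun e => if edges.contains e then (1 : Int) else 0)).sum ≠ clue then false
      else pvClueLoopB edges rest

-- nbrs(vs): one scan of the edge list
def pvNbrs (edges : List (PVtx × PVtx)) (vs : PySem.Set PVtx) : PySem.Set PVtx :=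
  edges.foldl (fun out uv =>
    let out := if PySem.Set.contains vs uv.1 then PySem.Set.add out uv.2 else out
    if PySem.Set.contains vs uv.2 then PySem.Set.add out uv.1 else out) PySem.Set.empty

def pvVerts (edges : List (PVtx × PVtx)) : PySem.Set PVtx :=
  edges.foldl (fun s uv => PySem.Set.add (PySem.Set.add s uv.1) uv.2) PySem.Set.empty

-- 'for _ in range(n): reach |= nbrs(reach)'
def pvGrow (edges : List (PVtx × PVtx)) : Nat → PySem.Set PVtx → PySem.Set PVtx
  | 0, reach => reach
  | n + 1, reach => pvGrow edges n (PySem.Set.union reach (pvNbrs edges reach))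

def is_valid_final_solution_py_alt (edges : List ((Int × Int) × (Int × Int))) (clues : List (Int × Int × Int)) : Bool :=
  match edges with
  | [] => false
  | e0 :: _ =>
      if pvClueLoopB edges clues = false then false
      else
        let verts := pvVerts edges
        if verts.any (fun v => decide (PySem.Set.len (pvNbrs edges (PySem.Set.ofList [v])) = 1)) then false
        else
          let reach := pvGrow edges verts.length (PySem.Set.ofList [e0.1])
          decide (PySem.Set.len reach = PySem.Set.len verts)

-- ===== PRECONDITION & SPEC =====
def Spec_is_valid_final_solution_py (edges : List ((Int × Int) × (Int × Int))) (clues : List (Int × Int × Int)) (out : Bool) : Prop := out = is_valid_final_solution_py_alt edges clues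
instance (edges : List ((Int × Int) × (Int × Int))) (clues : List (Int × Int × Int)) (out : Bool) : Decidable (Spec_is_valid_final_solution_py edges clues out) := by unfold Spec_is_valid_final_solution_py; infer_instance

-- ===== CLAIM (what is proved, stated in full; the proofs are below) =====
def Claim_equal_is_valid_final_solution_py : Prop := ∀ (edges : List ((Int × Int) × (Int × Int))) (clues : List (Int × Int × Int)), Dom_is_valid_final_solution_py edges clues → Spec_is_valid_final_solution_py edges clues (is_valid_final_solution_py edges clues)

-- ===== LEMMAS AND PROOFS =====

-- the undirected edge relation, endpoint predicate and reachability both programs decide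
def pvE (edges : List (PVtx × PVtx)) (v w : PVtx) : Prop := (v, w) ∈ edges ∨ (w, v) ∈ edges

def pvInV (edges : List (PVtx × PVtx)) (v : PVtx) : Prop := ∃ e ∈ edges, v = e.1 ∨ v = e.2

def pvReach (edges : List (PVtx × PVtx)) (s v : PVtx) : Prop := Relation.ReflTransGen (pvE edges) s v

lemma pvE_symm (edges : List (PVtx × PVtx)) : Symmetric (pvE edges) := by
  intro a b h; exact h.symm

lemma pvE_right_inV (edges : List (PVtx × PVtx)) {v w : PVtx} (h : pvE edges v w) : pvInV edges w := by
  rcases h with h | h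
  · exact ⟨(v, w), h, Or.inr rfl⟩
  · exact ⟨(w, v), h, Or.inl rfl⟩

-- ---- clue checks agree ----
lemma pvSort2_eq_of_le {p q : PVtx} (h : pvPairLe p q = true) : pvSort2 p q = (p, q) := by
  simp [pvSort2, h]

lemma pvClueCount_eq (edges : List (PVtx × PVtx)) (r c : Int) :
    pvClueCountA edges r c =
      ((pvCells r c).map (fun e => if edges.contains e then (1 : Int) else 0)).sum := by
  have h1 : pvSort2 (r, c) (r, c + 1) = ((r, c), (r, c + 1)) :=
    pvSort2_eq_of_le (by simp [pvPairLe])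
  have h2 : pvSort2 (r + 1, c) (r + 1, c + 1) = ((r + 1, c), (r + 1, c + 1)) :=
    pvSort2_eq_of_le (by simp [pvPairLe])
  have h3 : pvSort2 (r, c) (r + 1, c) = ((r, c), (r + 1, c)) :=
    pvSort2_eq_of_le (by simp [pvPairLe])
  have h4 : pvSort2 (r, c + 1) (r + 1, c + 1) = ((r, c + 1), (r + 1, c + 1)) :=
    pvSort2_eq_of_le (by simp [pvPairLe])
  simp only [pvClueCountA, pvCells, h1, h2, h3, h4, List.map, List.sum_cons, List.sum_nil]
  split_ifs <;> omega

lemma pvClueLoopA_eq_all (edges : List (PVtx × PVtx)) (l : List (Int × Int × Int)) :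
    pvClueLoopA edges l = l.all (fun t => decide (pvClueCountA edges t.1 t.2.1 = t.2.2)) := by
  induction l with
  | nil => rfl
  | cons t rest ih =>
    obtain ⟨r, c, clue⟩ := t
    by_cases h : pvClueCountA edges r c = clue
    · simp [pvClueLoopA, h, ih]
    · simp [pvClueLoopA, h]

lemma pvClueLoopB_eq_all (edges : List (PVtx × PVtx)) (l : List (Int × Int × Int)) :
    pvClueLoopB edges l =
      l.all (fun t => decide (((pvCells t.1 t.2.1).map (fun e => if edges.contains e then (1 : Int) else 0)).sum = t.2.2)) := by
  induction l with
  | nil => rfl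
  | cons t rest ih =>
    obtain ⟨r, c, clue⟩ := t
    by_cases h : ((pvCells r c).map (fun e => if e ∈ edges then (1 : Int) else 0)).sum = clue
    · simp [pvClueLoopB, h, ih]
    · simp [pvClueLoopB, h]

lemma mem_pvSortedClues (clues : List (Int × Int × Int)) (x : Int × Int × Int) :
    x ∈ pvSortedClues clues ↔ x ∈ clues := by
  unfold pvSortedClues
  suffices h : ∀ acc, x ∈ clues.foldl (fun acc x => PySem.List.insertBy pvTripLt x acc) acc ↔ x ∈ acc ∨ x ∈ clues by
    simpa using h []
  induction clues with
  | nil => simp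
  | cons t rest ih =>
    intro acc
    rw [List.foldl_cons, ih]
    simp [PySem.List.mem_insertBy]
    tauto

lemma pvClue_eq (edges : List (PVtx × PVtx)) (clues : List (Int × Int × Int)) :
    pvClueLoopA edges (pvSortedClues clues) = pvClueLoopB edges clues := by
  rw [pvClueLoopA_eq_all, pvClueLoopB_eq_all, Bool.eq_iff_iff]
  simp only [List.all_eq_true, mem_pvSortedClues]
  constructor
  · intro h t ht
    have := h t ht
    rw [pvClueCount_eq] at this
    exact this
  · intro h t ht
    rw [pvClueCount_eq]
    exact h t ht

-- ---- adjacency characterisation (A) ----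
lemma pv_insertEmpty_getD (d : PySem.Dict PVtx (PySem.Set PVtx)) (u x : PVtx) :
    ((if d.contains u then d else d.insert u PySem.Set.empty).getD x PySem.Set.empty)
      = d.getD x PySem.Set.empty := by
  by_cases h : d.contains u = true
  · simp [h]
  · have h' : d.contains u = false := Bool.eq_false_iff.2 h
    simp only [h', Bool.false_eq_true, if_false]
    rw [PySem.Dict.getD_insert]
    by_cases hx : x = u
    · rw [if_pos hx, hx, PySem.Dict.getD_of_not_contains _ _ h']
    · rw [if_neg hx]

lemma pvAdjStep_getD (d : PySem.Dict PVtx (PySem.Set PVtx)) (uv : PVtx × PVtx) (x w : PVtx) :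
    w ∈ (pvAdjStep d uv).getD x PySem.Set.empty ↔
      w ∈ d.getD x PySem.Set.empty ∨ (x = uv.1 ∧ w = uv.2) ∨ (x = uv.2 ∧ w = uv.1) := by
  simp only [pvAdjStep, PySem.Dict.getD_modify, pv_insertEmpty_getD]
  split_ifs <;> simp_all [PySem.Set.mem_add]

lemma pvAdjStep_contains (d : PySem.Dict PVtx (PySem.Set PVtx)) (uv : PVtx × PVtx) (x : PVtx) :
    (pvAdjStep d uv).contains x = true ↔
      d.contains x = true ∨ x = uv.1 ∨ x = uv.2 := by
  have hstep : ∀ (e : PySem.Dict PVtx (PySem.Set PVtx)) (u y : PVtx),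
      ((if e.contains u then e else e.insert u PySem.Set.empty).contains y) = true ↔
        (y = u ∨ e.contains y = true) := by
    intro e u y
    split_ifs with h
    · constructor
      · intro hy; exact Or.inr hy
      · rintro (rfl | hy)
        · exact h
        · exact hy
    · rw [PySem.Dict.contains_insert]; simp [beq_iff_eq]
  unfold pvAdjStep PySem.Dict.modify
  simp only [PySem.Dict.contains_insert, beq_iff_eq, Bool.or_eq_true]
  rw [hstep, hstep]
  tauto

lemma pvAdjA_getD_aux (l : List (PVtx × PVtx)) (d : PySem.Dict PVtx (PySem.Set PVtx)) (x w : PVtx) :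
    w ∈ (l.foldl pvAdjStep d).getD x PySem.Set.empty ↔
      w ∈ d.getD x PySem.Set.empty ∨ pvE l x w := by
  induction l generalizing d with
  | nil => simp [pvE]
  | cons uv rest ih =>
    rw [List.foldl_cons, ih, pvAdjStep_getD]
    obtain ⟨u, v⟩ := uv
    simp only [pvE, List.mem_cons]
    constructor
    · rintro ((h | ⟨rfl, rfl⟩ | ⟨rfl, rfl⟩) | h | h)
      · exact Or.inl h
      · exact Or.inr (Or.inl (Or.inl rfl))
      · exact Or.inr (Or.inr (Or.inl rfl))
      · exact Or.inr (Or.inl (Or.inr h))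
      · exact Or.inr (Or.inr (Or.inr h))
    · rintro (h | (h | h) | h | h)
      · exact Or.inl (Or.inl h)
      · cases h; exact Or.inl (Or.inr (Or.inl ⟨rfl, rfl⟩))
      · exact Or.inr (Or.inl h)
      · cases h; exact Or.inl (Or.inr (Or.inr ⟨rfl, rfl⟩))
      · exact Or.inr (Or.inr h)

lemma pvAdjA_getD (edges : List (PVtx × PVtx)) (x w : PVtx) :
    w ∈ (pvAdjA edges).getD x PySem.Set.empty ↔ pvE edges x w := by
  unfold pvAdjA
  rw [pvAdjA_getD_aux]
  simp [PySem.Dict.getD_empty, PySem.Set.empty]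

lemma pvAdjA_contains_aux (l : List (PVtx × PVtx)) (d : PySem.Dict PVtx (PySem.Set PVtx)) (x : PVtx) :
    (l.foldl pvAdjStep d).contains x = true ↔ d.contains x = true ∨ pvInV l x := by
  induction l generalizing d with
  | nil => simp [pvInV]
  | cons uv rest ih =>
    rw [List.foldl_cons, ih, pvAdjStep_contains]
    simp only [pvInV, List.mem_cons]
    constructor
    · rintro ((h | h | h) | ⟨e, he, hx⟩)
      · exact Or.inl h
      · exact Or.inr ⟨uv, Or.inl rfl, Or.inl h⟩
      · exact Or.inr ⟨uv, Or.inl rfl, Or.inr h⟩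
      · exact Or.inr ⟨e, Or.inr he, hx⟩
    · rintro (h | ⟨e, (rfl | he), hx⟩)
      · exact Or.inl (Or.inl h)
      · rcases hx with h | h
        · exact Or.inl (Or.inr (Or.inl h))
        · exact Or.inl (Or.inr (Or.inr h))
      · exact Or.inr ⟨e, he, hx⟩

lemma pvAdjA_contains (edges : List (PVtx × PVtx)) (x : PVtx) :
    (pvAdjA edges).contains x = true ↔ pvInV edges x := by
  unfold pvAdjA
  rw [pvAdjA_contains_aux]
  simp [PySem.Dict.contains_empty]

lemma pvAdjStep_getD_nodup (d : PySem.Dict PVtx (PySem.Set PVtx)) (uv : PVtx × PVtx)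
    (hd : ∀ y, (d.getD y PySem.Set.empty).Nodup) :
    ∀ y, ((pvAdjStep d uv).getD y PySem.Set.empty).Nodup := by
  intro y
  simp only [pvAdjStep, PySem.Dict.getD_modify, pv_insertEmpty_getD]
  split_ifs <;>
    first
      | exact hd _
      | exact PySem.Set.nodup_add _ _ (hd _)
      | exact PySem.Set.nodup_add _ _ (PySem.Set.nodup_add _ _ (hd _))

lemma pvAdjA_getD_nodup (edges : List (PVtx × PVtx)) (x : PVtx) :
    ((pvAdjA edges).getD x PySem.Set.empty).Nodup := by
  unfold pvAdjA
  suffices h : ∀ d : PySem.Dict PVtx (PySem.Set PVtx),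
      (∀ y, (d.getD y PySem.Set.empty).Nodup) →
      ∀ y, ((edges.foldl pvAdjStep d).getD y PySem.Set.empty).Nodup by
    exact h PySem.Dict.empty (fun y => by simp [PySem.Dict.getD_empty, PySem.Set.empty]) x
  induction edges with
  | nil => intro d hd; exact hd
  | cons uv rest ih =>
    intro d hd
    rw [List.foldl_cons]
    exact ih _ (pvAdjStep_getD_nodup d uv hd)

-- ---- verts / nbrs characterisation (B) ----
lemma mem_pvVerts_aux (l : List (PVtx × PVtx)) (s : PySem.Set PVtx) (x : PVtx) :
    x ∈ l.foldl (fun s uv => PySem.Set.add (PySem.Set.add s uv.1) uv.2) s ↔ x ∈ s ∨ pvInV l x := by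
  induction l generalizing s with
  | nil => simp [pvInV]
  | cons uv rest ih =>
    rw [List.foldl_cons, ih]
    simp only [PySem.Set.mem_add, pvInV, List.mem_cons]
    constructor
    · rintro (((h | h) | h) | ⟨e, he, hx⟩)
      · exact Or.inl h
      · exact Or.inr ⟨uv, Or.inl rfl, Or.inl h⟩
      · exact Or.inr ⟨uv, Or.inl rfl, Or.inr h⟩
      · exact Or.inr ⟨e, Or.inr he, hx⟩
    · rintro (h | ⟨e, (rfl | he), hx⟩)
      · exact Or.inl (Or.inl (Or.inl h))
      · rcases hx with h | h
        · exact Or.inl (Or.inl (Or.inr h))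
        · exact Or.inl (Or.inr h)
      · exact Or.inr ⟨e, he, hx⟩

lemma mem_pvVerts (edges : List (PVtx × PVtx)) (x : PVtx) :
    x ∈ pvVerts edges ↔ pvInV edges x := by
  unfold pvVerts
  rw [mem_pvVerts_aux]
  simp [PySem.Set.empty]

lemma pvVerts_nodup (edges : List (PVtx × PVtx)) : (pvVerts edges).Nodup := by
  unfold pvVerts
  suffices h : ∀ s : PySem.Set PVtx, s.Nodup →
      (edges.foldl (fun s uv => PySem.Set.add (PySem.Set.add s uv.1) uv.2) s).Nodup by
    exact h PySem.Set.empty (by simp [PySem.Set.empty])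
  induction edges with
  | nil => intro s hs; exact hs
  | cons uv rest ih =>
    intro s hs
    rw [List.foldl_cons]
    exact ih _ (PySem.Set.nodup_add _ _ (PySem.Set.nodup_add _ _ hs))

lemma pvContains_true {s : PySem.Set PVtx} {x : PVtx} (h : x ∈ s) :
    PySem.Set.contains s x = true := (PySem.Set.contains_iff _ _).2 h

lemma pv_mem_ite (c : Prop) [Decidable c] (a b : PySem.Set PVtx) (x : PVtx) :
    (x ∈ if c then a else b) ↔ (c ∧ x ∈ a) ∨ (¬c ∧ x ∈ b) := by
  split_ifs with h <;> tauto

lemma mem_pvNbrs_aux (l : List (PVtx × PVtx)) (vs : PySem.Set PVtx) (w : PVtx) :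
    ∀ out : PySem.Set PVtx,
    w ∈ l.foldl (fun out uv =>
        let out := if PySem.Set.contains vs uv.1 then PySem.Set.add out uv.2 else out
        if PySem.Set.contains vs uv.2 then PySem.Set.add out uv.1 else out) out ↔
      w ∈ out ∨ ∃ v, v ∈ vs ∧ pvE l v w := by
  induction l with
  | nil => intro out; simp [pvE]
  | cons uv rest ih =>
    obtain ⟨a, b⟩ := uv
    intro out
    rw [List.foldl_cons, ih]
    dsimp only
    have hstep :
        (w ∈ if PySem.Set.contains vs b then
            PySem.Set.add (if PySem.Set.contains vs a then PySem.Set.add out b else out) a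
          else (if PySem.Set.contains vs a then PySem.Set.add out b else out)) ↔
          w ∈ out ∨ (a ∈ vs ∧ w = b) ∨ (b ∈ vs ∧ w = a) := by
      simp only [pv_mem_ite, PySem.Set.mem_add, PySem.Set.contains_iff]
      tauto
    rw [hstep]
    constructor
    · rintro ((h | ⟨h1, rfl⟩ | ⟨h2, rfl⟩) | ⟨v, hv, hde⟩)
      · exact Or.inl h
      · exact Or.inr ⟨a, h1, Or.inl (List.mem_cons_self ..)⟩
      · exact Or.inr ⟨b, h2, Or.inr (List.mem_cons_self ..)⟩
      · exact Or.inr ⟨v, hv, hde.imp (List.mem_cons_of_mem _) (List.mem_cons_of_mem _)⟩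
    · rintro (h | ⟨v, hv, hde⟩)
      · exact Or.inl (Or.inl h)
      · replace hde : (v, w) ∈ (a, b) :: rest ∨ (w, v) ∈ (a, b) :: rest := hde
        rcases hde with h | h
        · rcases List.mem_cons.mp h with h | h
          · obtain ⟨rfl, rfl⟩ := (Prod.mk.injEq _ _ _ _).mp h
            exact Or.inl (Or.inr (Or.inl ⟨hv, rfl⟩))
          · exact Or.inr ⟨v, hv, Or.inl h⟩
        · rcases List.mem_cons.mp h with h | h
          · obtain ⟨rfl, rfl⟩ := (Prod.mk.injEq _ _ _ _).mp h
            exact Or.inl (Or.inr (Or.inr ⟨hv, rfl⟩))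
          · exact Or.inr ⟨v, hv, Or.inr h⟩

lemma mem_pvNbrs (edges : List (PVtx × PVtx)) (vs : PySem.Set PVtx) (w : PVtx) :
    w ∈ pvNbrs edges vs ↔ ∃ v, v ∈ vs ∧ pvE edges v w := by
  unfold pvNbrs
  rw [mem_pvNbrs_aux]
  simp [PySem.Set.empty]

lemma pvNbrs_nodup (edges : List (PVtx × PVtx)) (vs : PySem.Set PVtx) : (pvNbrs edges vs).Nodup := by
  unfold pvNbrs
  suffices h : ∀ out : PySem.Set PVtx, out.Nodup →
      (edges.foldl (fun out uv =>
        let out := if PySem.Set.contains vs uv.1 then PySem.Set.add out uv.2 else out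
        if PySem.Set.contains vs uv.2 then PySem.Set.add out uv.1 else out) out).Nodup by
    exact h PySem.Set.empty (by simp [PySem.Set.empty])
  induction edges with
  | nil => intro out hout; exact hout
  | cons uv rest ih =>
    intro out hout
    rw [List.foldl_cons]
    apply ih
    dsimp only
    split_ifs <;>
      first
        | exact PySem.Set.nodup_add _ _ (PySem.Set.nodup_add _ _ hout)
        | exact PySem.Set.nodup_add _ _ hout
        | exact hout

-- ---- DFS characterisation (A) ----
lemma pvPush_snd_mem (ws : List PVtx) :
    ∀ (stack : List PVtx) (vis : PySem.Set PVtx) (x : PVtx),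
    x ∈ (pvPush ws stack vis).2 ↔ x ∈ vis ∨ x ∈ ws := by
  induction ws with
  | nil => intro st vis x; simp [pvPush]
  | cons w ws' ih =>
    intro st vis x
    by_cases h : w ∈ vis
    · rw [pvPush_cons_of_mem ws' st h, ih]
      simp only [List.mem_cons]
      constructor
      · rintro (h' | h')
        · exact Or.inl h'
        · exact Or.inr (Or.inr h')
      · rintro (h' | rfl | h')
        · exact Or.inl h'
        · exact Or.inl h
        · exact Or.inr h'
    · rw [pvPush_cons_of_not_mem ws' st h, ih]
      simp only [PySem.Set.mem_add, List.mem_cons]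
      tauto

lemma pvPush_fst_mem (ws : List PVtx) :
    ∀ (stack : List PVtx) (vis : PySem.Set PVtx) (x : PVtx),
    x ∈ (pvPush ws stack vis).1 ↔ x ∈ stack ∨ (x ∈ ws ∧ x ∉ vis) := by
  induction ws with
  | nil => intro st vis x; simp [pvPush]
  | cons w ws' ih =>
    intro st vis x
    by_cases h : w ∈ vis
    · rw [pvPush_cons_of_mem ws' st h, ih]
      simp only [List.mem_cons]
      constructor
      · rintro (h' | ⟨h1, h2⟩)
        · exact Or.inl h'
        · exact Or.inr ⟨Or.inr h1, h2⟩
      · rintro (h' | ⟨rfl | h1, h2⟩)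
        · exact Or.inl h'
        · exact absurd h h2
        · exact Or.inr ⟨h1, h2⟩
    · rw [pvPush_cons_of_not_mem ws' st h, ih]
      simp only [List.mem_cons, PySem.Set.mem_add]
      constructor
      · rintro ((rfl | h') | ⟨h1, h2⟩)
        · exact Or.inr ⟨Or.inl rfl, h⟩
        · exact Or.inl h'
        · exact Or.inr ⟨Or.inr h1, fun hx => h2 (Or.inl hx)⟩
      · rintro (h' | ⟨rfl | h1, h2⟩)
        · exact Or.inl (Or.inr h')
        · exact Or.inl (Or.inl rfl)
        · by_cases hxw : x = w
          · exact Or.inl (Or.inl hxw)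
          · exact Or.inr ⟨h1, fun hx => hx.elim h2 hxw⟩

lemma pvDfs_mono (adj : PySem.Dict PVtx (PySem.Set PVtx)) :
    ∀ (stack : List PVtx) (vis : PySem.Set PVtx) (x : PVtx), x ∈ vis → x ∈ pvDfs adj stack vis := by
  intro stack vis
  induction stack, vis using pvDfs.induct adj with
  | case1 vis => intro x hx; simpa [pvDfs] using hx
  | case2 node rest vis p ih =>
    intro x hx
    rw [pvDfs]
    exact ih x ((pvPush_snd_mem _ _ _ _).2 (Or.inl hx))

lemma pvDfs_sound (adj : PySem.Dict PVtx (PySem.Set PVtx)) (P : PVtx → Prop)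
    (hP : ∀ a b, P a → b ∈ adj.getD a PySem.Set.empty → P b) :
    ∀ (stack : List PVtx) (vis : PySem.Set PVtx),
      (∀ x ∈ vis, P x) → (∀ x ∈ stack, P x) → ∀ x ∈ pvDfs adj stack vis, P x := by
  intro stack vis
  induction stack, vis using pvDfs.induct adj with
  | case1 vis => intro hv _ x hx; exact hv x (by simpa [pvDfs] using hx)
  | case2 node rest vis p ih =>
    intro hv hs x hx
    rw [pvDfs] at hx
    refine ih ?_ ?_ x hx
    · intro y hy
      rcases (pvPush_snd_mem _ _ _ _).1 hy with hy | hy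
      · exact hv y hy
      · exact hP node y (hs node (List.mem_cons_self ..)) hy
    · intro y hy
      rcases (pvPush_fst_mem _ _ _ _).1 hy with hy | ⟨hy, _⟩
      · exact hs y (List.mem_cons_of_mem _ hy)
      · exact hP node y (hs node (List.mem_cons_self ..)) hy

lemma pvDfs_closed (adj : PySem.Dict PVtx (PySem.Set PVtx)) :
    ∀ (stack : List PVtx) (vis : PySem.Set PVtx),
      (∀ x ∈ vis, x ∈ stack ∨ ∀ w ∈ adj.getD x PySem.Set.empty, w ∈ vis) →
      ∀ x ∈ pvDfs adj stack vis, ∀ w ∈ adj.getD x PySem.Set.empty, w ∈ pvDfs adj stack vis := by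
  intro stack vis
  induction stack, vis using pvDfs.induct adj with
  | case1 vis =>
    intro hinv x hx w hw
    rw [pvDfs] at hx ⊢
    rcases hinv x hx with h | h
    · exact absurd h (List.not_mem_nil)
    · exact h w hw
  | case2 node rest vis p ih =>
    intro hinv x hx w hw
    rw [pvDfs] at hx ⊢
    refine ih ?_ x hx w hw
    intro y hy
    have hvis : y ∈ vis → (y ∈ p.1 ∨ ∀ w' ∈ adj.getD y PySem.Set.empty, w' ∈ p.2) := by
      intro hyv
      rcases hinv y hyv with hys | hcl
      · rcases List.mem_cons.mp hys with rfl | hys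
        · exact Or.inr (fun w' hw' => (pvPush_snd_mem _ _ _ _).2 (Or.inr hw'))
        · exact Or.inl ((pvPush_fst_mem _ _ _ _).2 (Or.inl hys))
      · exact Or.inr (fun w' hw' => (pvPush_snd_mem _ _ _ _).2 (Or.inl (hcl w' hw')))
    rcases (pvPush_snd_mem _ _ _ _).1 hy with hyv | hyw
    · exact hvis hyv
    · by_cases hv : y ∈ vis
      · exact hvis hv
      · exact Or.inl ((pvPush_fst_mem _ _ _ _).2 (Or.inr ⟨hyw, hv⟩))

lemma pvReach_tail' {edges : List (PVtx × PVtx)} {s a b : PVtx}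
    (h : pvReach edges s a) (he : pvE edges a b) : pvReach edges s b :=
  Relation.ReflTransGen.tail h he

lemma pvDfs_reach (edges : List (PVtx × PVtx)) (s x : PVtx) :
    x ∈ pvDfs (pvAdjA edges) [s] (PySem.Set.add PySem.Set.empty s) ↔ pvReach edges s x := by
  constructor
  · refine pvDfs_sound (pvAdjA edges) (pvReach edges s) ?_ [s] _ ?_ ?_ x
    · intro a b ha hb
      exact pvReach_tail' ha ((pvAdjA_getD edges a b).1 hb)
    · intro y hy
      rcases (PySem.Set.mem_add _ _ _).1 hy with hy | rfl
      · simp [PySem.Set.empty] at hy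
      · exact Relation.ReflTransGen.refl
    · intro y hy
      rcases List.mem_cons.mp hy with rfl | hy
      · exact Relation.ReflTransGen.refl
      · exact absurd hy (List.not_mem_nil)
  · intro hr
    have hcl := pvDfs_closed (pvAdjA edges) [s] (PySem.Set.add PySem.Set.empty s) ?inv
    case inv =>
      intro y hy
      rcases (PySem.Set.mem_add _ _ _).1 hy with hy | rfl
      · simp [PySem.Set.empty] at hy
      · exact Or.inl (List.mem_cons_self ..)
    induction hr with
    | refl => exact pvDfs_mono _ _ _ _ ((PySem.Set.mem_add _ _ _).2 (Or.inr rfl))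
    | tail hab he ihx =>
      exact hcl _ ihx _ ((pvAdjA_getD edges _ _).2 he)

-- ---- component-count loop (A) ----
lemma pvCompLoop_cons_mem (adj : PySem.Dict PVtx (PySem.Set PVtx)) {s : PVtx}
    (rest : List PVtx) {vis : PySem.Set PVtx} (c : Int) (h : s ∈ vis) :
    pvCompLoop adj (s :: rest) vis c = pvCompLoop adj rest vis c := by
  simp only [pvCompLoop]
  rw [if_pos (pvContains_true h)]

lemma pvCompLoop_cons_not_mem (adj : PySem.Dict PVtx (PySem.Set PVtx)) {s : PVtx}
    (rest : List PVtx) {vis : PySem.Set PVtx} (c : Int) (h : s ∉ vis) :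
    pvCompLoop adj (s :: rest) vis c =
      pvCompLoop adj rest (pvDfs adj [s] (PySem.Set.add vis s)) (c + 1) := by
  simp only [pvCompLoop]
  rw [if_neg (fun hc => h ((PySem.Set.contains_iff _ _).1 hc))]

lemma pvCompLoop_ge (adj : PySem.Dict PVtx (PySem.Set PVtx)) :
    ∀ (starts : List PVtx) (vis : PySem.Set PVtx) (c : Int), c ≤ pvCompLoop adj starts vis c := by
  intro starts
  induction starts with
  | nil => intro vis c; simp [pvCompLoop]
  | cons s rest ih =>
    intro vis c
    by_cases h : s ∈ vis
    · rw [pvCompLoop_cons_mem adj rest c h]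
      exact ih vis c
    · rw [pvCompLoop_cons_not_mem adj rest c h]
      have := ih (pvDfs adj [s] (PySem.Set.add vis s)) (c + 1)
      omega

lemma pvCompLoop_eq_iff (adj : PySem.Dict PVtx (PySem.Set PVtx)) :
    ∀ (starts : List PVtx) (vis : PySem.Set PVtx) (c : Int),
      pvCompLoop adj starts vis c = c ↔ ∀ s ∈ starts, s ∈ vis := by
  intro starts
  induction starts with
  | nil => intro vis c; simp [pvCompLoop]
  | cons s rest ih =>
    intro vis c
    by_cases h : s ∈ vis
    · rw [pvCompLoop_cons_mem adj rest c h]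
      rw [ih]
      constructor
      · intro hall t ht
        rcases List.mem_cons.mp ht with rfl | ht
        · exact h
        · exact hall t ht
      · intro hall t ht
        exact hall t (List.mem_cons_of_mem _ ht)
    · rw [pvCompLoop_cons_not_mem adj rest c h]
      constructor
      · intro hc
        have := pvCompLoop_ge adj rest (pvDfs adj [s] (PySem.Set.add vis s)) (c + 1)
        omega
      · intro hall
        exact absurd (hall s (List.mem_cons_self ..)) h

-- ---- closure iteration (B) ----
lemma pvGrow_mono (edges : List (PVtx × PVtx)) :
    ∀ (n : Nat) (reach : PySem.Set PVtx) (x : PVtx), x ∈ reach → x ∈ pvGrow edges n reach := by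
  intro n
  induction n with
  | zero => intro reach x hx; simpa [pvGrow] using hx
  | succ n ih =>
    intro reach x hx
    rw [pvGrow]
    exact ih _ x ((PySem.Set.mem_union _ _ _).2 (Or.inl hx))

lemma pvGrow_sound (edges : List (PVtx × PVtx)) (P : PVtx → Prop)
    (hP : ∀ a b, P a → pvE edges a b → P b) :
    ∀ (n : Nat) (reach : PySem.Set PVtx), (∀ x ∈ reach, P x) → ∀ x ∈ pvGrow edges n reach, P x := by
  intro n
  induction n with
  | zero => intro reach hr x hx; exact hr x (by simpa [pvGrow] using hx)
  | succ n ih =>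
    intro reach hr x hx
    rw [pvGrow] at hx
    refine ih _ ?_ x hx
    intro y hy
    rcases (PySem.Set.mem_union _ _ _).1 hy with hy | hy
    · exact hr y hy
    · rcases (mem_pvNbrs _ _ _).1 hy with ⟨v, hv, he⟩
      exact hP v y (hr v hv) he

lemma pvGrow_nodup (edges : List (PVtx × PVtx)) :
    ∀ (n : Nat) (reach : PySem.Set PVtx), reach.Nodup → (pvGrow edges n reach).Nodup := by
  intro n
  induction n with
  | zero => intro reach h; simpa [pvGrow] using h
  | succ n ih =>
    intro reach h
    rw [pvGrow]
    exact ih _ (PySem.Set.nodup_union _ _ h)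

lemma pvUnion_nbrs_eq_self (edges : List (PVtx × PVtx)) (reach : PySem.Set PVtx)
    (h : ∀ w ∈ pvNbrs edges reach, w ∈ reach) :
    PySem.Set.union reach (pvNbrs edges reach) = reach := by
  show PySem.Set.update reach (pvNbrs edges reach) = reach
  rw [PySem.Set.update_eq_append_filter,
    PySem.Set.ofList_eq_self_of_nodup _ (pvNbrs_nodup edges reach)]
  have hnil : (pvNbrs edges reach).filter (fun y => !PySem.Set.contains reach y) = [] := by
    rw [List.filter_eq_nil_iff]
    intro a ha
    simpa using h a ha
  rw [hnil, List.append_nil]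

lemma pvGrow_fix (edges : List (PVtx × PVtx)) (reach : PySem.Set PVtx)
    (h : ∀ w ∈ pvNbrs edges reach, w ∈ reach) : ∀ n, pvGrow edges n reach = reach := by
  intro n
  induction n with
  | zero => rfl
  | succ n ih =>
    rw [pvGrow, pvUnion_nbrs_eq_self edges reach h, ih]

lemma pvGrow_closed (edges : List (PVtx × PVtx)) :
    ∀ (n : Nat) (reach : PySem.Set PVtx), reach.Nodup → (∀ x ∈ reach, pvInV edges x) →
      (pvVerts edges).toFinset.card ≤ reach.length + n →
      ∀ w ∈ pvNbrs edges (pvGrow edges n reach), w ∈ pvGrow edges n reach := by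
  intro n
  induction n with
  | zero =>
    intro reach hnd hin hcard
    have hsub : reach.toFinset ⊆ (pvVerts edges).toFinset := by
      intro x hx
      rw [List.mem_toFinset] at hx ⊢
      exact (mem_pvVerts _ _).2 (hin x hx)
    have hcardr : reach.toFinset.card = reach.length := List.toFinset_card_of_nodup hnd
    have heq : reach.toFinset = (pvVerts edges).toFinset :=
      Finset.eq_of_subset_of_card_le hsub (by omega)
    intro w hw
    rw [pvGrow] at hw ⊢
    rcases (mem_pvNbrs _ _ _).1 hw with ⟨v, hv, he⟩
    have hwin : pvInV edges w := pvE_right_inV _ he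
    have : w ∈ (pvVerts edges).toFinset := by
      rw [List.mem_toFinset]
      exact (mem_pvVerts _ _).2 hwin
    rw [← heq, List.mem_toFinset] at this
    exact this
  | succ n ih =>
    intro reach hnd hin hcard
    by_cases hfix : ∀ w ∈ pvNbrs edges reach, w ∈ reach
    · rw [pvGrow_fix edges reach hfix]
      exact hfix
    · simp only [not_forall, exists_prop] at hfix
      obtain ⟨w0, hw0, hw0n⟩ := hfix
      have hlen : reach.length + 1 ≤ (PySem.Set.union reach (pvNbrs edges reach)).length := by
        have : PySem.Set.union reach (pvNbrs edges reach) =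
            reach ++ (pvNbrs edges reach).filter (fun y => !PySem.Set.contains reach y) := by
          show PySem.Set.update reach (pvNbrs edges reach) = _
          rw [PySem.Set.update_eq_append_filter,
            PySem.Set.ofList_eq_self_of_nodup _ (pvNbrs_nodup edges reach)]
        rw [this, List.length_append]
        have hmemf : w0 ∈ (pvNbrs edges reach).filter (fun y => !PySem.Set.contains reach y) := by
          rw [List.mem_filter]
          refine ⟨hw0, ?_⟩
          simpa using hw0n
        have := List.length_pos_of_mem hmemf
        omega
      have h1 : (PySem.Set.union reach (pvNbrs edges reach)).Nodup :=
        PySem.Set.nodup_union _ _ hnd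
      have h2 : ∀ x ∈ PySem.Set.union reach (pvNbrs edges reach), pvInV edges x := by
        intro x hx
        rcases (PySem.Set.mem_union _ _ _).1 hx with hx | hx
        · exact hin x hx
        · rcases (mem_pvNbrs _ _ _).1 hx with ⟨v, hv, he⟩
          exact pvE_right_inV _ he
      have h3 : (pvVerts edges).toFinset.card ≤
          (PySem.Set.union reach (pvNbrs edges reach)).length + n := by omega
      have := ih (PySem.Set.union reach (pvNbrs edges reach)) h1 h2 h3
      rw [pvGrow]
      exact this

lemma pvReach_inV (edges : List (PVtx × PVtx)) {s x : PVtx} (hs : pvInV edges s)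
    (hr : pvReach edges s x) : pvInV edges x := by
  induction hr with
  | refl => exact hs
  | tail hab he => exact pvE_right_inV _ he

lemma pvGrow_reach (edges : List (PVtx × PVtx)) (s : PVtx) (hs : pvInV edges s) (x : PVtx) :
    x ∈ pvGrow edges (pvVerts edges).length (PySem.Set.ofList [s]) ↔ pvReach edges s x := by
  have hofl : PySem.Set.ofList [s] = [s] := PySem.Set.ofList_eq_self_of_nodup _ (by simp)
  rw [hofl]
  constructor
  · refine pvGrow_sound edges (pvReach edges s)
      (fun a b ha he => pvReach_tail' ha he) _ [s] ?_ x
    intro y hy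
    rcases List.mem_cons.mp hy with rfl | hy
    · exact Relation.ReflTransGen.refl
    · exact absurd hy (List.not_mem_nil)
  · intro hr
    have hcl := pvGrow_closed edges (pvVerts edges).length [s] (by simp)
      (by intro y hy; rcases List.mem_cons.mp hy with rfl | hy
          · exact hs
          · exact absurd hy (List.not_mem_nil))
      (by have := List.toFinset_card_le (pvVerts edges); simp; omega)
    induction hr with
    | refl => exact pvGrow_mono _ _ _ _ (List.mem_cons_self ..)
    | tail hab he ihx =>
      exact hcl _ ((mem_pvNbrs _ _ _).2 ⟨_, ihx, he⟩)

-- ---- bridging lemmas ----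
lemma pvReach_all_iff (edges : List (PVtx × PVtx)) (s t : PVtx)
    (hs : pvInV edges s) (ht : pvInV edges t) :
    (∀ v, pvInV edges v → pvReach edges s v) ↔ (∀ v, pvInV edges v → pvReach edges t v) := by
  have hsymm : Symmetric (pvReach edges) :=
    Relation.ReflTransGen.symmetric (pvE_symm edges)
  constructor
  · intro h v hv
    exact Relation.ReflTransGen.trans (hsymm (h t ht)) (h v hv)
  · intro h v hv
    exact Relation.ReflTransGen.trans (hsymm (h s hs)) (h v hv)

-- ---- active vertices / degree checks agree ----
lemma mem_pvActive (edges : List (PVtx × PVtx)) (x : PVtx) :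
    x ∈ PySem.List.sorted2 (pvAdjA edges).keys (fun v => v.1) (fun v => v.2) ↔ pvInV edges x := by
  rw [(PySem.List.sorted2_perm (pvAdjA edges).keys (fun v => v.1) (fun v => v.2) false).mem_iff]
  rw [← PySem.Dict.contains_iff_mem_keys]
  exact pvAdjA_contains edges x

lemma pvDegLoopA_eq (adj : PySem.Dict PVtx (PySem.Set PVtx)) :
    ∀ l : List PVtx, pvDegLoopA adj l =
      !(l.any (fun v => decide (PySem.Set.len (adj.getD v PySem.Set.empty) = 1))) := by
  intro l
  induction l with
  | nil => rfl
  | cons v rest ih =>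
    simp [pvDegLoopA, ih]

lemma pvDeg_eq (edges : List (PVtx × PVtx)) (v : PVtx) :
    PySem.Set.len ((pvAdjA edges).getD v PySem.Set.empty) =
      PySem.Set.len (pvNbrs edges (PySem.Set.ofList [v])) := by
  have hperm : ((pvAdjA edges).getD v PySem.Set.empty).Perm (pvNbrs edges (PySem.Set.ofList [v])) := by
    rw [List.perm_ext_iff_of_nodup (pvAdjA_getD_nodup edges v) (pvNbrs_nodup _ _)]
    intro w
    rw [pvAdjA_getD, mem_pvNbrs,
      PySem.Set.ofList_eq_self_of_nodup _ (by simp : ([v] : List PVtx).Nodup)]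
    constructor
    · intro h
      exact ⟨v, List.mem_cons_self .., h⟩
    · rintro ⟨u, hu, h⟩
      rcases List.mem_cons.mp hu with rfl | hu
      · exact h
      · exact absurd hu (List.not_mem_nil)
  unfold PySem.Set.len
  rw [hperm.length_eq]

lemma pvDeg_any_eq (edges : List (PVtx × PVtx)) :
    (PySem.List.sorted2 (pvAdjA edges).keys (fun v => v.1) (fun v => v.2)).any
        (fun v => decide (PySem.Set.len ((pvAdjA edges).getD v PySem.Set.empty) = 1)) =
      (pvVerts edges).any
        (fun v => decide (PySem.Set.len (pvNbrs edges (PySem.Set.ofList [v])) = 1)) := by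
  rw [Bool.eq_iff_iff]
  simp only [List.any_eq_true, decide_eq_true_eq]
  constructor
  · rintro ⟨v, hv, h⟩
    exact ⟨v, (mem_pvVerts _ _).2 ((mem_pvActive _ _).1 hv), by rw [← pvDeg_eq]; exact h⟩
  · rintro ⟨v, hv, h⟩
    exact ⟨v, (mem_pvActive _ _).2 ((mem_pvVerts _ _).1 hv), by rw [pvDeg_eq]; exact h⟩

-- ---- the two connectivity verdicts ----
lemma pvComp_one_iff (edges : List (PVtx × PVtx)) (a1 : PVtx) (arest : List PVtx)
    (hact : PySem.List.sorted2 (pvAdjA edges).keys (fun v => v.1) (fun v => v.2) = a1 :: arest) :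
    pvCompLoop (pvAdjA edges) (a1 :: arest) PySem.Set.empty 0 = 1 ↔
      ∀ v, pvInV edges v → pvReach edges a1 v := by
  have h1 : a1 ∉ (PySem.Set.empty : PySem.Set PVtx) := by simp [PySem.Set.empty]
  rw [pvCompLoop_cons_not_mem _ arest 0 h1]
  rw [show (0 : Int) + 1 = 1 from rfl]
  rw [pvCompLoop_eq_iff]
  constructor
  · intro hall v hv
    have hva : v ∈ a1 :: arest := by
      rw [← hact]
      exact (mem_pvActive edges v).2 hv
    rcases List.mem_cons.mp hva with rfl | hv'
    · exact Relation.ReflTransGen.refl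
    · exact (pvDfs_reach edges a1 v).1 (hall v hv')
  · intro hall t ht
    refine (pvDfs_reach edges a1 t).2 (hall t ?_)
    have hmem : t ∈ a1 :: arest := List.mem_cons_of_mem _ ht
    rw [← hact] at hmem
    exact (mem_pvActive edges t).1 hmem

lemma pvLen_eq_iff (edges : List (PVtx × PVtx)) (s : PVtx) (hs : pvInV edges s) :
    PySem.Set.len (pvGrow edges (pvVerts edges).length (PySem.Set.ofList [s])) =
        PySem.Set.len (pvVerts edges) ↔
      ∀ v, pvInV edges v → pvReach edges s v := by
  have hFmem : ∀ x, x ∈ pvGrow edges (pvVerts edges).length (PySem.Set.ofList [s]) ↔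
      pvReach edges s x := pvGrow_reach edges s hs
  have hFnodup : (pvGrow edges (pvVerts edges).length (PySem.Set.ofList [s])).Nodup :=
    pvGrow_nodup edges _ _ (PySem.Set.nodup_ofList _)
  have hFsub : ∀ x ∈ pvGrow edges (pvVerts edges).length (PySem.Set.ofList [s]),
      x ∈ pvVerts edges := fun x hx =>
    (mem_pvVerts _ _).2 (pvReach_inV edges hs ((hFmem x).1 hx))
  unfold PySem.Set.len
  rw [Nat.cast_inj]
  constructor
  · intro hlen v hv
    have hsubF : (pvGrow edges (pvVerts edges).length (PySem.Set.ofList [s])).toFinset ⊆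
        (pvVerts edges).toFinset := by
      intro x hx
      rw [List.mem_toFinset] at hx ⊢
      exact hFsub x hx
    have heq := Finset.eq_of_subset_of_card_le hsubF (by
      rw [List.toFinset_card_of_nodup hFnodup, List.toFinset_card_of_nodup (pvVerts_nodup edges)]
      omega)
    have hvF : v ∈ pvGrow edges (pvVerts edges).length (PySem.Set.ofList [s]) := by
      have hv' : v ∈ (pvGrow edges (pvVerts edges).length (PySem.Set.ofList [s])).toFinset := by
        rw [heq, List.mem_toFinset]
        exact (mem_pvVerts _ _).2 hv
      rwa [List.mem_toFinset] at hv'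
    exact (hFmem v).1 hvF
  · intro hall
    have hperm : (pvGrow edges (pvVerts edges).length (PySem.Set.ofList [s])).Perm (pvVerts edges) := by
      rw [List.perm_ext_iff_of_nodup hFnodup (pvVerts_nodup edges)]
      intro x
      constructor
      · exact hFsub x
      · intro hx
        exact (hFmem x).2 (hall x ((mem_pvVerts _ _).1 hx))
    exact hperm.length_eq

-- ===== VERDICT (by name: the statement is the Claim_ definition above) =====
theorem is_valid_final_solution_py_spec : Claim_equal_is_valid_final_solution_py := by
  intro edges clues _hdom
  unfold Spec_is_valid_final_solution_py
  cases edges with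
  | nil => rfl
  | cons e0 erest =>
    unfold is_valid_final_solution_py is_valid_final_solution_py_alt
    dsimp only
    rw [if_neg (by simp : ¬((e0 :: erest).isEmpty = true))]
    rw [pvClue_eq]
    by_cases hclue : pvClueLoopB (e0 :: erest) clues = false
    · rw [if_pos hclue, if_pos hclue]
    · rw [if_neg hclue, if_neg hclue]
      have hmem1 : e0.1 ∈ PySem.List.sorted2 (pvAdjA (e0 :: erest)).keys (fun v => v.1) (fun v => v.2) :=
        (mem_pvActive _ _).2 ⟨e0, List.mem_cons_self .., Or.inl rfl⟩
      have hne : ¬((PySem.List.sorted2 (pvAdjA (e0 :: erest)).keys (fun v => v.1) (fun v => v.2)).isEmpty = true) := by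
        intro h
        rw [List.isEmpty_iff] at h
        rw [h] at hmem1
        exact absurd hmem1 (List.not_mem_nil)
      rw [if_neg hne]
      rw [pvDegLoopA_eq, pvDeg_any_eq]
      by_cases hdeg : (pvVerts (e0 :: erest)).any
          (fun v => decide (PySem.Set.len (pvNbrs (e0 :: erest) (PySem.Set.ofList [v])) = 1)) = true
      · rw [if_pos hdeg, if_pos (by rw [hdeg]; rfl)]
      · have hdegb : (pvVerts (e0 :: erest)).any
            (fun v => decide (PySem.Set.len (pvNbrs (e0 :: erest) (PySem.Set.ofList [v])) = 1)) = false :=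
          Bool.eq_false_iff.2 hdeg
        rw [if_neg (by rw [hdegb]; simp), if_neg hdeg]
        obtain ⟨a1, arest, hact⟩ : ∃ a t,
            PySem.List.sorted2 (pvAdjA (e0 :: erest)).keys (fun v => v.1) (fun v => v.2) = a :: t := by
          cases h : PySem.List.sorted2 (pvAdjA (e0 :: erest)).keys (fun v => v.1) (fun v => v.2) with
          | nil => rw [h] at hmem1; exact absurd hmem1 (List.not_mem_nil)
          | cons a t => exact ⟨a, t, rfl⟩
        rw [hact, decide_eq_decide]
        have hIa1 : pvInV (e0 :: erest) a1 :=
          (mem_pvActive _ _).1 (hact ▸ List.mem_cons_self ..)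
        have hIs : pvInV (e0 :: erest) e0.1 := ⟨e0, List.mem_cons_self .., Or.inl rfl⟩
        rw [pvComp_one_iff (e0 :: erest) a1 arest hact, pvLen_eq_iff (e0 :: erest) e0.1 hIs]
        exact pvReach_all_iff _ a1 e0.1 hIa1 hIs
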